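-- pv_equiv track=rewrite | github.com/rd-o/tetris-pg | tetris_game.py | __calculate_wells
-- ===== SOURCE A (Python) =====
-- def __calculate_wells(grid):
--     """Count the number of wells in the grid."""
--     wells = 0
--     for x in range(len(grid[0])):
--         for y in range(len(grid)):
--             if grid[y][x] == 0:
--                 if (x == 0 or grid[y][x - 1] != 0) and (x == len(grid[0]) - 1 or grid[y][x + 1] != 0):
--                     wells += 1
--     return wells
-- ===== SOURCE B (Python) =====
-- def __calculate_wells(grid):
--     """Count the number of wells: per row, count maximal runs of zeros of length exactly 1."""
--     width = len(grid[0])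
--     wells = 0
--     for row in grid:
--         run = 0
--         for cell in row[:width]:
--             if cell == 0:
--                 run += 1
--             else:
--                 if run == 1:
--                     wells += 1
--                 run = 0
--         if run == 1:
--             wells += 1
--     return wells
-- ===== Notes on version B (the rewrite author's own statement) =====
-- stated objective: alternative
-- what changed: Replaces A's column-major scan with a per-cell three-neighbour index test by a row-major single pass that compresses each row into runs of zeros and counts zero-runs of length exactly 1.
import Mathlib
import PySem

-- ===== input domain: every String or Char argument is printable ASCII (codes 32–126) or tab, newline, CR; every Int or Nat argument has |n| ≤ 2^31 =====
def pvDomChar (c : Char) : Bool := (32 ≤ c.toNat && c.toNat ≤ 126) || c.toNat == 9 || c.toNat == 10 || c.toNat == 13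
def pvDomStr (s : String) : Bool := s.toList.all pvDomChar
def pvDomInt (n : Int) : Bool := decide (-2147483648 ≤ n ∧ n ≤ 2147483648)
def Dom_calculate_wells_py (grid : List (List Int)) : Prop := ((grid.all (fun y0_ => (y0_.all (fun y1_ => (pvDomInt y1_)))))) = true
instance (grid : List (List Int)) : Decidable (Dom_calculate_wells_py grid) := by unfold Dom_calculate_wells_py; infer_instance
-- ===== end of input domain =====

-- B replaces A's column-major three-neighbour index test by a row-major run-compression pass
-- counting zero-runs of length exactly 1 (same cost; a different decomposition).
-- ===== PORT A =====
def calculate_wells_py (grid : List (List Int)) : Int :=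
  let w : Int := ((PySem.List.pyGetD grid 0 []).length : Int)
  (PySem.List.pyRange 0 w 1).foldl (fun wells x =>
    (PySem.List.pyRange 0 ((grid.length : Int)) 1).foldl (fun wells y =>
      let row := PySem.List.pyGetD grid y []
      if PySem.List.pyGetD row x 1 = 0 then
        if (x = 0 ∨ PySem.List.pyGetD row (x - 1) 1 ≠ 0) ∧
           (x = w - 1 ∨ PySem.List.pyGetD row (x + 1) 1 ≠ 0)
        then wells + 1 else wells
      else wells) wells) 0

-- ===== PORT B =====
def calculate_wells_py_alt (grid : List (List Int)) : Int :=
  let w : Int := ((PySem.List.pyGetD grid 0 []).length : Int)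
  grid.foldl (fun wells row =>
    let p := (PySem.List.slice row none (some w)).foldl
      (fun (s : Int × Int) cell =>
        if cell = 0 then (s.1, s.2 + 1)
        else (if s.2 = 1 then s.1 + 1 else s.1, 0)) (wells, 0)
    if p.2 = 1 then p.1 + 1 else p.1) 0

-- ===== PRECONDITION & SPEC =====
-- Pre_ excludes exactly the inputs where Python A raises IndexError: the empty grid
-- (A evaluates grid[0] first) and grids with a row shorter than the first row.
def Pre_calculate_wells_py (grid : List (List Int)) : Prop :=
  grid ≠ [] ∧ ∀ row ∈ grid, (grid.headD []).length ≤ row.length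
instance (grid : List (List Int)) : Decidable (Pre_calculate_wells_py grid) := by
  unfold Pre_calculate_wells_py; infer_instance
def pvWitness_calculate_wells_py : List (List Int) := [[1, 0], [0, 0]]

def Spec_calculate_wells_py (grid : List (List Int)) (out : Int) : Prop :=
  out = calculate_wells_py_alt grid
instance (grid : List (List Int)) (out : Int) : Decidable (Spec_calculate_wells_py grid out) := by
  unfold Spec_calculate_wells_py; infer_instance

-- ===== CLAIM (what is proved, stated in full; the proofs are below) =====
def Claim_equal_calculate_wells_py : Prop := ∀ (grid : List (List Int)), Dom_calculate_wells_py grid → Pre_calculate_wells_py grid → Spec_calculate_wells_py grid (calculate_wells_py grid)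

-- ===== LEMMAS AND PROOFS =====

-- head of t is nonzero, or t is the end of the row
def hdOk : List Int → Bool
  | [] => true
  | c :: _ => decide (c ≠ 0)

-- well count by looking ahead at each zero cell (lok = "left neighbour nonzero or left edge")
def hWells : Bool → List Int → Int
  | _, [] => 0
  | lok, c :: t => (if c = 0 ∧ lok = true ∧ hdOk t = true then 1 else 0) + hWells (decide (c ≠ 0)) t

-- well count by run length of the current zero run (B's scheme)
def runWells : Int → List Int → Int
  | run, [] => if run = 1 then 1 else 0
  | run, c :: t => if c = 0 then runWells (run + 1) t else (if run = 1 then 1 else 0) + runWells 0 t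

-- A's per-cell indicator, on the truncated row t, Nat index
def indP (lok : Bool) (t : List Int) (k : Nat) : Int :=
  if t.getD k 1 = 0 ∧ (if k = 0 then lok = true else t.getD (k - 1) 1 ≠ 0) ∧
     (k + 1 = t.length ∨ t.getD (k + 1) 1 ≠ 0) then 1 else 0

-- A's per-cell indicator as written in the port (Int index, pyGetD on the full row)
def indA (w : Int) (row : List Int) (x : Int) : Int :=
  if PySem.List.pyGetD row x 1 = 0 ∧ (x = 0 ∨ PySem.List.pyGetD row (x - 1) 1 ≠ 0) ∧
     (x = w - 1 ∨ PySem.List.pyGetD row (x + 1) 1 ≠ 0) then 1 else 0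

lemma indP_succ (lok : Bool) (c : Int) (t : List Int) (k : Nat) :
    indP lok (c :: t) (k + 1) = indP (decide (c ≠ 0)) t k := by
  unfold indP
  rcases k with _ | k <;> simp only [List.getD] <;>
    refine if_congr (and_congr Iff.rfl (and_congr ?_ ?_)) rfl rfl <;>
    simp <;> constructor <;> rintro (h | h) <;> simp [h]

lemma indP_zero (lok : Bool) (c : Int) (t : List Int) :
    indP lok (c :: t) 0 = if c = 0 ∧ lok = true ∧ hdOk t = true then 1 else 0 := by
  rcases t with _ | ⟨b, t⟩ <;> simp [indP, hdOk, List.getD]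

lemma sum_indP (t : List Int) (lok : Bool) :
    ((List.range t.length).map (indP lok t)).sum = hWells lok t := by
  induction t generalizing lok with
  | nil => simp [hWells]
  | cons c t ih =>
      rw [List.length_cons, List.range_succ_eq_map]
      simp only [List.map_cons, List.map_map, List.sum_cons]
      have h1 : (List.range t.length).map (indP lok (c :: t) ∘ Nat.succ)
          = (List.range t.length).map (indP (decide (c ≠ 0)) t) := by
        refine List.map_congr_left fun k _ => ?_
        simpa using indP_succ lok c t k
      rw [h1, ih, indP_zero, hWells]

lemma runWells_eq (t : List Int) :
    runWells 0 t = hWells true t ∧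
    runWells 1 t = (if hdOk t then 1 else 0) + hWells false t ∧
    (∀ run : Int, 2 ≤ run → runWells run t = hWells false t) := by
  induction t with
  | nil => refine ⟨rfl, by simp [runWells, hWells, hdOk], fun run h => by
      simp [runWells, hWells]; omega⟩
  | cons c t ih =>
      obtain ⟨ih0, ih1, ih2⟩ := ih
      by_cases hc : c = 0
      · subst hc
        refine ⟨?_, ?_, fun run h => ?_⟩
        · simp [runWells, hWells, hdOk, ih1]
        · simp [runWells, hWells, hdOk, ih2 2 (by omega)]
        · simp only [runWells]
          rw [ih2 (run + 1) (by omega)]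
          simp [hWells, hdOk]
      · refine ⟨?_, ?_, fun run h => ?_⟩
        · simp [runWells, hWells, hc, ih0]
        · simp [runWells, hWells, hdOk, hc, ih0]
        · simp [runWells, hWells, hc, ih0]; omega

-- the B-side scan with (wells, run) state, finalized, is wells + runWells run t
lemma scan_eq (t : List Int) (wells run : Int) :
    (let p := t.foldl (fun (s : Int × Int) cell =>
        if cell = 0 then (s.1, s.2 + 1)
        else (if s.2 = 1 then s.1 + 1 else s.1, 0)) (wells, run);
     if p.2 = 1 then p.1 + 1 else p.1) = wells + runWells run t := by
  induction t generalizing wells run with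
  | nil => simp only [List.foldl_nil, runWells]; split_ifs <;> omega
  | cons c t ih =>
      simp only [List.foldl_cons, runWells]
      by_cases hc : c = 0
      · simp [hc, ih]
      · simp only [if_neg hc]
        rw [ih]
        split_ifs <;> omega

-- A's Int-indexed indicator agrees with indP true on the truncated row
lemma indA_eq_indP (row : List Int) (n : Nat) (hn : n ≤ row.length) (k : Nat) (hk : k < n) :
    indA (n : Int) row (k : Int) = indP true (row.take n) k := by
  have hlen : (row.take n).length = n := by simp [hn]
  have hget : ∀ j : Nat, j < n → PySem.List.pyGetD row (j : Int) 1 = (row.take n).getD j 1 := by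
    intro j hj
    rw [PySem.List.pyGetD_natCast]
    have hj' : j < row.length := lt_of_lt_of_le hj hn
    rw [List.getD_eq_getElem _ _ hj', List.getD_eq_getElem _ _ (by omega : j < (row.take n).length),
      List.getElem_take]
  unfold indA indP
  refine if_congr (and_congr ?_ (and_congr ?_ ?_)) rfl rfl
  · rw [hget k hk]
  · by_cases hk0 : k = 0
    · subst hk0; simp
    · have h0 : (k : Int) ≠ 0 := by exact_mod_cast hk0
      have hcast : (k : Int) - 1 = ((k - 1 : Nat) : Int) := by omega
      rw [hcast, hget (k - 1) (by omega)]
      simp [hk0]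
  · rw [hlen]
    by_cases hke : k + 1 = n
    · constructor <;> intro _ <;> left <;> omega
    · have h1 : ¬ ((k : Int) = (n : Int) - 1) := by omega
      have hcast : (k : Int) + 1 = ((k + 1 : Nat) : Int) := by omega
      rw [hcast, hget (k + 1) (by omega)]
      simp [h1, hke]

-- per-row: A's sum over column indices = B's run count on the truncated row
lemma row_sum_eq (row : List Int) (n : Nat) (hn : n ≤ row.length) :
    ((PySem.List.pyRange 0 (n : Int) 1).map (indA (n : Int) row)).sum
      = runWells 0 (row.take n) := by
  rw [PySem.List.pyRange_one]
  have h0 : ((n : Int) - 0).toNat = n := by omega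
  rw [h0, List.map_map]
  have hmap : (List.range n).map ((indA (n : Int) row) ∘ fun k : Nat => 0 + (k : Int))
      = (List.range n).map (indP true (row.take n)) := by
    refine List.map_congr_left fun k hk => ?_
    have hk' : k < n := List.mem_range.mp hk
    simpa using indA_eq_indP row n hn k hk'
  rw [hmap]
  have hlen : (row.take n).length = n := by simp [hn]
  have hs := sum_indP (row.take n) true
  rw [hlen] at hs
  rw [hs, ← (runWells_eq (row.take n)).1]

-- list-level double-sum swap
lemma sum_sum_comm {α β : Type} (l : List α) (m : List β) (f : α → β → Int) :
    (l.map (fun x => (m.map (f x)).sum)).sum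
      = (m.map (fun r => (l.map (fun x => f x r)).sum)).sum := by
  induction l with
  | nil => simp
  | cons a l ih =>
      simp only [List.map_cons, List.sum_cons, ih]
      rw [← PySem.List.sum_map_add_int]

-- A's inner (row) loop as an additive fold of indicators
lemma inner_eq (grid : List (List Int)) (w x wells : Int) :
    (PySem.List.pyRange 0 ((grid.length : Int)) 1).foldl (fun wells y =>
      let row := PySem.List.pyGetD grid y []
      if PySem.List.pyGetD row x 1 = 0 then
        if (x = 0 ∨ PySem.List.pyGetD row (x - 1) 1 ≠ 0) ∧
           (x = w - 1 ∨ PySem.List.pyGetD row (x + 1) 1 ≠ 0)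
        then wells + 1 else wells
      else wells) wells
    = wells + (grid.map (fun row => indA w row x)).sum := by
  rw [PySem.List.foldl_pyRange_zero_pyGetD' grid []
      (fun wells row =>
        if PySem.List.pyGetD row x 1 = 0 then
          if (x = 0 ∨ PySem.List.pyGetD row (x - 1) 1 ≠ 0) ∧
             (x = w - 1 ∨ PySem.List.pyGetD row (x + 1) 1 ≠ 0)
          then wells + 1 else wells
        else wells) wells]
  have h : ∀ (acc : Int) (row : List Int),
      (if PySem.List.pyGetD row x 1 = 0 then
        if (x = 0 ∨ PySem.List.pyGetD row (x - 1) 1 ≠ 0) ∧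
           (x = w - 1 ∨ PySem.List.pyGetD row (x + 1) 1 ≠ 0)
        then acc + 1 else acc
      else acc) = acc + indA w row x := by
    intro acc row
    unfold indA
    split_ifs <;> first | rfl | omega
  simp only [h]
  rw [PySem.List.foldl_add]

lemma head_getD (grid : List (List Int)) : grid.getD 0 ([] : List Int) = grid.headD [] := by
  cases grid <;> rfl

-- A as a double sum of indicators
lemma A_eq_double_sum (grid : List (List Int)) :
    calculate_wells_py grid
      = ((PySem.List.pyRange 0 (((grid.headD []).length : Int)) 1).map
          (fun x => (grid.map (fun row => indA ((grid.headD []).length : Int) row x)).sum)).sum := by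
  unfold calculate_wells_py
  simp only [PySem.List.pyGetD_zero, head_getD]
  simp only [inner_eq]
  rw [PySem.List.foldl_add
      (g := fun x => (grid.map (fun row => indA ((grid.headD []).length : Int) row x)).sum)]
  simp

-- B as a sum of per-row run counts
lemma B_eq_sum (grid : List (List Int)) :
    calculate_wells_py_alt grid
      = (grid.map (fun row => runWells 0 (row.take (grid.headD []).length))).sum := by
  unfold calculate_wells_py_alt
  simp only [PySem.List.pyGetD_zero, head_getD]
  have h : ∀ (wells : Int) (row : List Int),
      (let p := (PySem.List.slice row none (some ((grid.headD []).length : Int))).foldl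
          (fun (s : Int × Int) cell =>
            if cell = 0 then (s.1, s.2 + 1)
            else (if s.2 = 1 then s.1 + 1 else s.1, 0)) (wells, 0);
        if p.2 = 1 then p.1 + 1 else p.1)
      = wells + runWells 0 (row.take (grid.headD []).length) := by
    intro wells row
    rw [PySem.List.slice_to_natCast]
    exact scan_eq (row.take (grid.headD []).length) wells 0
  simp only [h]
  simpa using PySem.List.foldl_add (fun row => runWells 0 (List.take (grid.headD []).length row)) (l := grid) (a := (0 : Int))

-- ===== VERDICT (by name: the statement is the Claim_ definition above) =====
theorem calculate_wells_py_spec : Claim_equal_calculate_wells_py := by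
  unfold Claim_equal_calculate_wells_py
  intro grid _ hpre
  obtain ⟨-, hrows⟩ := hpre
  unfold Spec_calculate_wells_py
  rw [A_eq_double_sum, B_eq_sum, sum_sum_comm]
  refine congrArg List.sum (List.map_congr_left fun row hrow => ?_)
  exact row_sum_eq row (grid.headD []).length (hrows row hrow)
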